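-- pv_equiv track=rewrite | github.com/YishuGudd/in-hackathon2025-ai-agent-genai-notification | notification_generator/notification_server.py | passes_dietary_guardrail
-- ===== SOURCE A (Python) =====
-- def passes_dietary_guardrail(notification: dict, dietary_pref: str) -> bool:
--     """Check if notification respects dietary preferences"""
--     if not dietary_pref or dietary_pref.lower() in ['none', 'no preference']:
--         return True
--
--     dietary_lower = dietary_pref.lower()
--     content = f"{notification['title']} {notification['body']} {notification['keyword']}".lower()
--
--     # Vegetarian guardrails
--     if 'vegetarian' in dietary_lower:
--         meat_keywords = ['meat', 'chicken', 'beef', 'pork', 'bacon', 'sausage', 'steak', 'turkey']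
--         if any(meat in content for meat in meat_keywords):
--             return False
--
--     # Vegan guardrails
--     if 'vegan' in dietary_lower:
--         animal_products = ['meat', 'chicken', 'beef', 'dairy', 'cheese', 'egg', 'milk', 'bacon', 'butter']
--         if any(product in content for product in animal_products):
--             return False
--
--     # Pescatarian guardrails
--     if 'pescatarian' in dietary_lower:
--         meats = ['chicken', 'beef', 'pork', 'bacon', 'sausage', 'steak', 'turkey', 'lamb']
--         if any(meat in content for meat in meats):
--             return False
--
--     return True
-- ===== SOURCE B (Python) =====
-- # Inverted index: keyword -> diets that forbid it (keyword-major scan instead of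
-- # A's diet-major branch blocks). Only False can be returned inside the loop, so
-- # scan order is irrelevant to the result.
-- _FORBIDDEN_FOR = {
--     'meat': ('vegetarian', 'vegan'),
--     'chicken': ('vegetarian', 'vegan', 'pescatarian'),
--     'beef': ('vegetarian', 'vegan', 'pescatarian'),
--     'pork': ('vegetarian', 'pescatarian'),
--     'bacon': ('vegetarian', 'vegan', 'pescatarian'),
--     'sausage': ('vegetarian', 'pescatarian'),
--     'steak': ('vegetarian', 'pescatarian'),
--     'turkey': ('vegetarian', 'pescatarian'),
--     'dairy': ('vegan',),
--     'cheese': ('vegan',),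
--     'egg': ('vegan',),
--     'milk': ('vegan',),
--     'butter': ('vegan',),
--     'lamb': ('pescatarian',),
-- }
--
--
-- def passes_dietary_guardrail(notification: dict, dietary_pref: str) -> bool:
--     if not dietary_pref or dietary_pref.lower() in ('none', 'no preference'):
--         return True
--     dietary_lower = dietary_pref.lower()
--     content = f"{notification['title']} {notification['body']} {notification['keyword']}".lower()
--     for keyword, diets in _FORBIDDEN_FOR.items():
--         if keyword in content and any(d in dietary_lower for d in diets):
--             return False
--     return True
-- ===== Notes on version B (the rewrite author's own statement) =====
-- stated objective: alternative
-- what changed: Inverts the data structure: instead of A's three diet-major branch blocks each scanning its own forbidden list, B builds a keyword->forbidding-diets inverted index and makes one keyword-major pass, correct because every rule can only return False so scan order is irrelevant.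
-- outside the precondition, e.g. on passes_dietary_guardrail({}, 'vegan'): A raises KeyError, B raises KeyError
import Mathlib
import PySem

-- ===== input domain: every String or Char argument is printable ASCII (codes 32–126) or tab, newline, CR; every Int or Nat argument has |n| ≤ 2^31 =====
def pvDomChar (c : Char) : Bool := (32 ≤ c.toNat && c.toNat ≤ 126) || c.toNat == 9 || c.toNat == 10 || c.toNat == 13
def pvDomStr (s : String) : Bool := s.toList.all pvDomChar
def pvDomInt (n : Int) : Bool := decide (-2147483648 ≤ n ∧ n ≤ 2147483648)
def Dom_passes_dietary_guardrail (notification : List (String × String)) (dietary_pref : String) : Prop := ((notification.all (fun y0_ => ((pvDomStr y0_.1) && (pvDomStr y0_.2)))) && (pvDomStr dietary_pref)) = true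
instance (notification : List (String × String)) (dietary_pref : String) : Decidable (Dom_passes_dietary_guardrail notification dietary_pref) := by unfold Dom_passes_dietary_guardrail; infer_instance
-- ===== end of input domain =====

-- B inverts the data structure: a keyword->forbidding-diets index scanned keyword-major,
-- instead of A's three diet-major branch blocks (alternative decomposition; return-value equivalence).

-- ===== PORT A =====
-- content = f"{title} {body} {keyword}".lower(); Pre_ guarantees the keys (getD "") unless short-circuited
def passes_dietary_guardrail (notification : List (String × String)) (dietary_pref : String) : Bool :=
  if dietary_pref == "" || ["none", "no preference"].contains (PySem.Str.lower dietary_pref) then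
    true
  else
    let dietary_lower := PySem.Str.lower dietary_pref
    let content := PySem.Str.lower (PySem.Str.join " "
      [PySem.Dict.getD (PySem.Dict.mk notification) "title" "",
       PySem.Dict.getD (PySem.Dict.mk notification) "body" "",
       PySem.Dict.getD (PySem.Dict.mk notification) "keyword" ""])
    if PySem.Str.isIn "vegetarian" dietary_lower &&
        (["meat", "chicken", "beef", "pork", "bacon", "sausage", "steak", "turkey"].any
          (fun m => PySem.Str.isIn m content)) then
      false
    else if PySem.Str.isIn "vegan" dietary_lower &&
        (["meat", "chicken", "beef", "dairy", "cheese", "egg", "milk", "bacon", "butter"].any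
          (fun m => PySem.Str.isIn m content)) then
      false
    else if PySem.Str.isIn "pescatarian" dietary_lower &&
        (["chicken", "beef", "pork", "bacon", "sausage", "steak", "turkey", "lamb"].any
          (fun m => PySem.Str.isIn m content)) then
      false
    else
      true

-- ===== PORT B =====
-- inverted index: keyword -> diets that forbid it (dict in insertion order)
def pvForbiddenFor : List (String × List String) :=
  [("meat", ["vegetarian", "vegan"]),
   ("chicken", ["vegetarian", "vegan", "pescatarian"]),
   ("beef", ["vegetarian", "vegan", "pescatarian"]),
   ("pork", ["vegetarian", "pescatarian"]),
   ("bacon", ["vegetarian", "vegan", "pescatarian"]),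
   ("sausage", ["vegetarian", "pescatarian"]),
   ("steak", ["vegetarian", "pescatarian"]),
   ("turkey", ["vegetarian", "pescatarian"]),
   ("dairy", ["vegan"]),
   ("cheese", ["vegan"]),
   ("egg", ["vegan"]),
   ("milk", ["vegan"]),
   ("butter", ["vegan"]),
   ("lamb", ["pescatarian"])]

def passes_dietary_guardrail_alt (notification : List (String × String)) (dietary_pref : String) : Bool :=
  if dietary_pref == "" || ["none", "no preference"].contains (PySem.Str.lower dietary_pref) then
    true
  else
    let dietary_lower := PySem.Str.lower dietary_pref
    let content := PySem.Str.lower (PySem.Str.join " "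
      [PySem.Dict.getD (PySem.Dict.mk notification) "title" "",
       PySem.Dict.getD (PySem.Dict.mk notification) "body" "",
       PySem.Dict.getD (PySem.Dict.mk notification) "keyword" ""])
    -- the Python for-loop returning False on a hit = negation of an existence scan
    !(pvForbiddenFor.any (fun kd =>
        PySem.Str.isIn kd.1 content && kd.2.any (fun d => PySem.Str.isIn d dietary_lower)))

-- ===== PRECONDITION & SPEC =====
-- Pre_ excludes only inputs where A raises KeyError: the preference does not short-circuit and a key is missing.
def Pre_passes_dietary_guardrail (notification : List (String × String)) (dietary_pref : String) : Prop :=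
  (dietary_pref = "" ∨ PySem.Str.lower dietary_pref = "none" ∨ PySem.Str.lower dietary_pref = "no preference") ∨
  ((notification.map Prod.fst).contains "title" = true ∧
   (notification.map Prod.fst).contains "body" = true ∧
   (notification.map Prod.fst).contains "keyword" = true)
instance (notification : List (String × String)) (dietary_pref : String) : Decidable (Pre_passes_dietary_guardrail notification dietary_pref) := by unfold Pre_passes_dietary_guardrail; infer_instance

def pvWitness_passes_dietary_guardrail : (List (String × String)) × String :=
  ([("title", "Tofu stir fry"), ("body", "fresh veggies"), ("keyword", "tofu")], "vegan")

def Spec_passes_dietary_guardrail (notification : List (String × String)) (dietary_pref : String) (out : Bool) : Prop := out = passes_dietary_guardrail_alt notification dietary_pref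
instance (notification : List (String × String)) (dietary_pref : String) (out : Bool) : Decidable (Spec_passes_dietary_guardrail notification dietary_pref out) := by unfold Spec_passes_dietary_guardrail; infer_instance

-- ===== CLAIM =====
def Claim_equal_passes_dietary_guardrail : Prop := ∀ (notification : List (String × String)) (dietary_pref : String), Dom_passes_dietary_guardrail notification dietary_pref → Pre_passes_dietary_guardrail notification dietary_pref → Spec_passes_dietary_guardrail notification dietary_pref (passes_dietary_guardrail notification dietary_pref)

-- ===== LEMMAS AND PROOFS =====

-- ===== VERDICT =====
theorem passes_dietary_guardrail_spec : Claim_equal_passes_dietary_guardrail := by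
  intro notification dietary_pref _ _
  unfold Spec_passes_dietary_guardrail passes_dietary_guardrail passes_dietary_guardrail_alt
  by_cases h : (dietary_pref == "" || ["none", "no preference"].contains (PySem.Str.lower dietary_pref)) = true
  · simp only [h, if_true]
  · simp only [Bool.not_eq_true] at h
    simp only [h, Bool.false_eq_true, if_false, pvForbiddenFor, List.any_cons, List.any_nil,
      Bool.or_false]
    generalize PySem.Str.isIn "vegetarian" (PySem.Str.lower dietary_pref) = g1
    generalize PySem.Str.isIn "vegan" (PySem.Str.lower dietary_pref) = g2
    generalize PySem.Str.isIn "pescatarian" (PySem.Str.lower dietary_pref) = g3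
    generalize PySem.Str.isIn "meat" _ = k1
    generalize PySem.Str.isIn "chicken" _ = k2
    generalize PySem.Str.isIn "beef" _ = k3
    generalize PySem.Str.isIn "pork" _ = k4
    generalize PySem.Str.isIn "bacon" _ = k5
    generalize PySem.Str.isIn "sausage" _ = k6
    generalize PySem.Str.isIn "steak" _ = k7
    generalize PySem.Str.isIn "turkey" _ = k8
    generalize PySem.Str.isIn "dairy" _ = k9
    generalize PySem.Str.isIn "cheese" _ = k10
    generalize PySem.Str.isIn "egg" _ = k11
    generalize PySem.Str.isIn "milk" _ = k12
    generalize PySem.Str.isIn "butter" _ = k13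
    generalize PySem.Str.isIn "lamb" _ = k14
    cases g1 <;> cases g2 <;> cases g3 <;>
      simp [Bool.and_assoc, Bool.and_left_comm, Bool.and_self_left]
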